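-- pv_equiv track=rewrite | github.com/xeureka/CP | codeForce/problemset/Divisibility Problem.py | func
-- ===== SOURCE A (Python) =====
-- def func(a,b):
--         cout = 0
--
--         while True:
--             if a % b ==0:
--                 return cout
--             else:
--                 a +=1
--                 cout +=1
-- ===== SOURCE B (Python) =====
-- def func(a, b):
--     return (-a) % abs(b)
-- ===== Notes on version B (the rewrite author's own statement) =====
-- stated objective: faster
-- what changed: Replaces the increment-until-divisible loop by the closed form (-a) % abs(b), which directly computes the distance to the next multiple of b.
import Mathlib
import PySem

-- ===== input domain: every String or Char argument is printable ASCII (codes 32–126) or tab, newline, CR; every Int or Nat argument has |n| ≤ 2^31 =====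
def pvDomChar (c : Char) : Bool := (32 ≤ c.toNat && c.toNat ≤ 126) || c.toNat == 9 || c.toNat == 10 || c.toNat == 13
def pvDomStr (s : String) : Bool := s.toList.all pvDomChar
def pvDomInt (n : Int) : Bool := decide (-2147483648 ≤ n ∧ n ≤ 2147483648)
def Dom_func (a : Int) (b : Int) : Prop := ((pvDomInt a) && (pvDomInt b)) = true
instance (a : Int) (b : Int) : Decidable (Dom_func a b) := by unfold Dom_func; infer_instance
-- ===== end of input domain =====

-- B replaces A's increment-until-divisible loop by the closed form (-a) % abs(b) (O(1) vs O(|b|)).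

-- ===== PORT A =====
-- 'while True' loop of A; the fuel (|b|+1) only makes the recursion total: inside
-- Pre_func (b ≠ 0) the loop exits within |b| iterations, so the fuel is never exhausted.
def funcLoop : Nat → Int → Int → Int → Int
  | 0, _, _, cout => cout
  | f+1, a, b, cout =>
      if PySem.Int.mod a b = 0 then cout
      else funcLoop f (a+1) b (cout+1)

def func (a : Int) (b : Int) : Int := funcLoop (b.natAbs + 1) a b 0

-- ===== PORT B =====
def func_alt (a : Int) (b : Int) : Int := PySem.Int.mod (-a) |b|

-- ===== PRECONDITION & SPEC =====
-- Pre_ excludes exactly b = 0, where the Python A raises ZeroDivisionError (a % 0).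
def Pre_func (a : Int) (b : Int) : Prop := b ≠ 0
instance (a : Int) (b : Int) : Decidable (Pre_func a b) := by unfold Pre_func; infer_instance
def pvWitness_func : Int × Int := (3, 2)

def Spec_func (a : Int) (b : Int) (out : Int) : Prop := out = func_alt a b
instance (a : Int) (b : Int) (out : Int) : Decidable (Spec_func a b out) := by unfold Spec_func; infer_instance

-- ===== CLAIM (what is proved, stated in full; the proofs are below) =====
def Claim_equal_func : Prop := ∀ (a : Int) (b : Int), Dom_func a b → Pre_func a b → Spec_func a b (func a b)

-- ===== LEMMAS AND PROOFS =====

lemma pv_mod_step (a b : Int) (hb : b ≠ 0) (h0 : PySem.Int.mod a b ≠ 0) :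
    PySem.Int.mod (-(a+1)) |b| = PySem.Int.mod (-a) |b| - 1 := by
  have hB : (0:Int) < |b| := abs_pos.mpr hb
  have hm : PySem.Int.mod (-a) |b| = (-a) % |b| := PySem.Int.mod_eq_emod_of_pos hB
  have hm' : PySem.Int.mod (-(a+1)) |b| = (-(a+1)) % |b| := PySem.Int.mod_eq_emod_of_pos hB
  have hne : ¬ b ∣ a := fun hd => h0 ((PySem.Int.mod_eq_zero_iff_dvd a b).mpr hd)
  have hnn : 0 ≤ (-a) % |b| := Int.emod_nonneg _ (ne_of_gt hB)
  have hlt : (-a) % |b| < |b| := Int.emod_lt_of_pos _ hB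
  have hpos : 0 < (-a) % |b| := by
    rcases lt_or_eq_of_le hnn with h | h
    · exact h
    · exfalso
      have : |b| ∣ (-a) := Int.dvd_of_emod_eq_zero h.symm
      exact hne (dvd_neg.mp ((abs_dvd b (-a)).mp this))
  have hB1 : 1 < |b| := by omega
  have h1 : (1:Int) % |b| = 1 := Int.emod_eq_of_lt (by omega) hB1
  have : (-(a+1)) % |b| = ((-a) % |b| - 1 % |b|) % |b| := by
    rw [← Int.sub_emod]; ring_nf
  rw [hm', hm, this, h1, Int.emod_eq_of_lt (by omega) (by omega)]

lemma pv_loop_eq (b : Int) (hb : b ≠ 0) :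
    ∀ (f : Nat) (a cout : Int), (PySem.Int.mod (-a) |b|).toNat < f →
      funcLoop f a b cout = cout + PySem.Int.mod (-a) |b| := by
  intro f
  induction f with
  | zero => intro a cout h; omega
  | succ f ih =>
    intro a cout h
    have hB : (0:Int) < |b| := abs_pos.mpr hb
    by_cases h0 : PySem.Int.mod a b = 0
    · have hdvd : b ∣ a := (PySem.Int.mod_eq_zero_iff_dvd a b).mp h0
      have hz : PySem.Int.mod (-a) |b| = 0 := by
        rw [PySem.Int.mod_eq_zero_iff_dvd]
        exact (abs_dvd b (-a)).mpr (dvd_neg.mpr hdvd)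
      simp [funcLoop, h0, hz]
    · have hstep := pv_mod_step a b hb h0
      have hnn : 0 ≤ PySem.Int.mod (-a) |b| := by
        rw [PySem.Int.mod_eq_emod_of_pos hB]; exact Int.emod_nonneg _ (ne_of_gt hB)
      have hpos : 0 < PySem.Int.mod (-a) |b| := by
        rcases lt_or_eq_of_le hnn with hp | hp
        · exact hp
        · exfalso
          have hd : |b| ∣ (-a) := by
            have := (PySem.Int.mod_eq_zero_iff_dvd (-a) |b|).mp hp.symm
            exact this
          exact h0 ((PySem.Int.mod_eq_zero_iff_dvd a b).mpr (dvd_neg.mp ((abs_dvd b (-a)).mp hd)))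
      have hrec := ih (a+1) (cout+1) (by rw [hstep]; omega)
      simp only [funcLoop, h0, if_false]
      rw [hrec, hstep]; ring

-- ===== VERDICT (by name: the statement is the Claim_ definition above) =====
theorem func_spec : Claim_equal_func := by
  intro a b _ hb
  unfold Spec_func func func_alt
  have hB : (0:Int) < |b| := abs_pos.mpr hb
  have hlt : PySem.Int.mod (-a) |b| < |b| := by
    rw [PySem.Int.mod_eq_emod_of_pos hB]; exact Int.emod_lt_of_pos _ hB
  have hfuel : (PySem.Int.mod (-a) |b|).toNat < b.natAbs + 1 := by
    have : |b| = (b.natAbs : Int) := (Int.abs_eq_natAbs b)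
    omega
  rw [pv_loop_eq b hb _ a 0 hfuel]; ring
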